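-- pv_equiv track=rewrite | github.com/pgirolami/ifrs-expert | src/case_analysis/workflow.py | _extract_prompt_content
-- ===== SOURCE A (Python) =====
-- def _extract_prompt_content(full_output: str) -> str:
--     lines = full_output.split("\n")
--     start_idx = 0
--     for index, line in enumerate(lines):
--         if line.startswith("You are an IFRS expert"):
--             start_idx = index
--             break
--     return "\n".join(lines[start_idx:])
-- ===== SOURCE B (Python) =====
-- def _extract_prompt_content(full_output: str) -> str:
--     marker = "You are an IFRS expert"
--     if full_output.startswith(marker):
--         return full_output
--     idx = full_output.find("\n" + marker)
--     if idx == -1: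
--         return full_output
--     return full_output[idx + 1:]
-- ===== Notes on version B (the rewrite author's own statement) =====
-- stated objective: idiomatic
-- what changed: Replaced A's split-into-lines, enumerate-with-break loop and join pipeline by a direct startswith check plus a single raw-string find of the newline-prefixed marker and one slice of the original string.
import Mathlib
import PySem

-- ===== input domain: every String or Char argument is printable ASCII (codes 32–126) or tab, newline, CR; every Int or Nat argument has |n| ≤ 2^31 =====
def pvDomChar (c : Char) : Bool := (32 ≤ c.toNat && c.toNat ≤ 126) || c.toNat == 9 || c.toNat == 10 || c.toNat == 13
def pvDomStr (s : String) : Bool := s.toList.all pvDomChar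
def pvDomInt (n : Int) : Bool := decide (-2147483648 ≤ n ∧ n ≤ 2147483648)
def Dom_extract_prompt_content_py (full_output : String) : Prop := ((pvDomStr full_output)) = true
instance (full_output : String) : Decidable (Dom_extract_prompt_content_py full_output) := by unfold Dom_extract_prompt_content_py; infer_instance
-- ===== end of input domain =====

-- B replaces A's split-into-lines / enumerate loop / join pipeline by a direct startswith check and a single raw-string find of "\n"+marker followed by one slice (idiomatic; return value proved equal).
-- ===== PORT A =====
def pvFindStartA : List (Int × String) → Int
  | [] => 0
  | (i, line) :: rest =>
      if PySem.Str.startswith line "You are an IFRS expert" then i else pvFindStartA rest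

def extract_prompt_content_py (full_output : String) : String :=
  let lines : List String := (PySem.Str.split? full_output "\n").getD []
  let start_idx : Int := pvFindStartA (PySem.List.enumerate lines 0)
  PySem.Str.join "\n" (PySem.List.slice lines (some start_idx) none)

-- ===== PORT B =====
def extract_prompt_content_py_alt (full_output : String) : String :=
  if PySem.Str.startswith full_output "You are an IFRS expert" then full_output
  else
    let idx : Int := PySem.Str.find full_output ("\n" ++ "You are an IFRS expert")
    if idx = -1 then full_output
    else PySem.Str.slice full_output (some (idx + 1)) none


-- ===== PRECONDITION & SPEC =====
def Spec_extract_prompt_content_py (full_output : String) (out : String) : Prop := out = extract_prompt_content_py_alt full_output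
instance (full_output : String) (out : String) : Decidable (Spec_extract_prompt_content_py full_output out) := by unfold Spec_extract_prompt_content_py; infer_instance

-- ===== CLAIM (what is proved, stated in full; the proofs are below) =====
def Claim_equal_extract_prompt_content_py : Prop := ∀ (full_output : String), Dom_extract_prompt_content_py full_output → Spec_extract_prompt_content_py full_output (extract_prompt_content_py full_output)

-- ===== LEMMAS AND PROOFS =====
def pvSplitNL : List Char → List (List Char)
  | [] => [[]]
  | c :: t => if c = '\n' then [] :: pvSplitNL t
              else match pvSplitNL t with
                   | [] => [[c]]
                   | h :: tl => (c :: h) :: tl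

theorem pvSplitNL_ne_nil (cs : List Char) : pvSplitNL cs ≠ [] := by
  cases cs with
  | nil => simp [pvSplitNL]
  | cons c t =>
    simp only [pvSplitNL]
    split
    · simp
    · split <;> simp

theorem pv_go_eq (fuel : Nat) : ∀ (l cur : List Char) (acc : List (List Char)), l.length < fuel →
    PySem.Chars.splitOn.go ['\n'] fuel l cur acc =
      acc.reverse ++ (pvSplitNL l).modifyHead (cur.reverse ++ ·) := by
  induction fuel with
  | zero => intro l cur acc h; omega
  | succ n ih =>
    intro l cur acc h
    cases l with
    | nil =>
      rw [PySem.Chars.splitOn.go.eq_def]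
      simp [pvSplitNL]
    | cons c rest =>
      rw [PySem.Chars.splitOn.go.eq_def]
      have hlen : rest.length < n := by simpa using Nat.lt_of_succ_lt_succ h
      by_cases hc : c = '\n'
      · have hpre : (['\n'].isPrefixOf (c :: rest)) = true := by
          simp [List.isPrefixOf, hc]
        simp only [hpre, if_pos]
        have hdrop : List.drop ['\n'].length (c :: rest) = rest := by simp
        rw [hdrop, ih rest [] (cur.reverse :: acc) hlen]
        cases hsp : pvSplitNL rest with
        | nil => exact absurd hsp (pvSplitNL_ne_nil rest)
        | cons hd tl => simp [pvSplitNL, hc, hsp]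
      · have hpre : (['\n'].isPrefixOf (c :: rest)) = false := by
          simp only [List.isPrefixOf, List.isPrefixOf_nil_left, Bool.and_true]
          exact beq_eq_false_iff_ne.mpr (fun hh => hc hh.symm)
        simp only [hpre, Bool.false_eq_true, if_neg, not_false_iff]
        rw [ih rest (c :: cur) acc hlen]
        cases hsp : pvSplitNL rest with
        | nil => exact absurd hsp (pvSplitNL_ne_nil rest)
        | cons hd tl => simp [pvSplitNL, hc, hsp]

theorem pvSplitOn_eq (cs : List Char) : PySem.Chars.splitOn cs ['\n'] = pvSplitNL cs := by
  unfold PySem.Chars.splitOn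
  rw [pv_go_eq (cs.length + 1) cs [] [] (by omega)]
  cases hsp : pvSplitNL cs with
  | nil => exact absurd hsp (pvSplitNL_ne_nil cs)
  | cons hd tl => simp

theorem pvSplitNL_no_nl (cs : List Char) (h : '\n' ∉ cs) : pvSplitNL cs = [cs] := by
  induction cs with
  | nil => rfl
  | cons c t iht =>
    have hc : c ≠ '\n' := fun hh => h (hh ▸ List.mem_cons_self)
    have ht : '\n' ∉ t := fun hh => h (List.mem_cons_of_mem _ hh)
    simp [pvSplitNL, hc, iht ht]

theorem pvSplitNL_append (p t : List Char) (h : '\n' ∉ p) :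
    pvSplitNL (p ++ '\n' :: t) = p :: pvSplitNL t := by
  induction p with
  | nil => simp [pvSplitNL]
  | cons c q ihq =>
    have hc : c ≠ '\n' := fun hh => h (hh ▸ List.mem_cons_self)
    have hq : '\n' ∉ q := fun hh => h (List.mem_cons_of_mem _ hh)
    cases hsp : pvSplitNL (q ++ '\n' :: t) with
    | nil => exact absurd hsp (pvSplitNL_ne_nil _)
    | cons hd tl =>
      have := ihq hq
      rw [hsp] at this
      cases this
      simp [pvSplitNL, hc, hsp]

theorem pv_join_splitNL (cs : List Char) : PySem.Chars.join ['\n'] (pvSplitNL cs) = cs := by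
  induction cs with
  | nil => simp [pvSplitNL, PySem.Chars.join_singleton]
  | cons c t iht =>
    by_cases hc : c = '\n'
    · subst hc
      cases hsp : pvSplitNL t with
      | nil => exact absurd hsp (pvSplitNL_ne_nil t)
      | cons hd tl =>
        rw [hsp] at iht
        simp only [pvSplitNL, if_pos rfl, hsp, if_true]
        rw [PySem.Chars.join_cons_cons]
        simp [iht]
    · cases hsp : pvSplitNL t with
      | nil => exact absurd hsp (pvSplitNL_ne_nil t)
      | cons hd tl =>
        rw [hsp] at iht
        simp only [pvSplitNL, hc, if_false, hsp, if_neg]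
        cases tl with
        | nil =>
          simp only [PySem.Chars.join_singleton] at iht ⊢
          simp [iht]
        | cons b bs =>
          rw [PySem.Chars.join_cons_cons] at iht
          rw [PySem.Chars.join_cons_cons]
          simp [← iht]

-- marker
def pvM : List Char := "You are an IFRS expert".toList

theorem pvM_no_nl : '\n' ∉ pvM := by decide

-- H1
theorem pv_prefix_no_nl (m : List Char) (hm : '\n' ∉ m) :
    ∀ (p t : List Char), m <+: p ++ '\n' :: t → m <+: p := by
  induction m with
  | nil => intro p t _; exact List.nil_prefix
  | cons c m' ihm =>
    intro p t hpre
    cases p with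
    | nil =>
      rw [List.nil_append, List.cons_prefix_cons] at hpre
      exact absurd (hpre.1 ▸ List.mem_cons_self) hm
    | cons d p' =>
      rw [List.cons_append, List.cons_prefix_cons] at hpre
      have hm' : '\n' ∉ m' := fun hh => hm (List.mem_cons_of_mem _ hh)
      exact List.cons_prefix_cons.mpr ⟨hpre.1, ihm hm' p' t hpre.2⟩

-- H2
theorem pv_not_prefix_drop_lt (p t : List Char) (hp : '\n' ∉ p) (i : Nat) (hi : i < p.length) :
    ¬ ('\n' :: pvM) <+: (p ++ '\n' :: t).drop i := by
  intro hpre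
  rw [List.drop_append_of_le_length (Nat.le_of_lt hi), List.drop_eq_getElem_cons hi,
    List.cons_append, List.cons_prefix_cons] at hpre
  exact hp (hpre.1 ▸ List.getElem_mem hi)

-- infix of drop characterization
theorem pv_infix_iff_exists_drop (sub s : List Char) : sub <:+: s ↔ ∃ j, sub <+: s.drop j := by
  rw [← PySem.Chars.isIn_iff_infix, ← PySem.Chars.exists_prefix_drop_iff_isIn]

-- H3
theorem pv_infix_decomp (p t : List Char) (hp : '\n' ∉ p) :
    ('\n' :: pvM) <:+: (p ++ '\n' :: t) ↔ (pvM <+: t ∨ ('\n' :: pvM) <:+: t) := by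
  constructor
  · intro h
    obtain ⟨j, hj⟩ := (pv_infix_iff_exists_drop _ _).mp h
    rcases lt_trichotomy j p.length with hlt | heq | hgt
    · exact absurd hj (pv_not_prefix_drop_lt p t hp j hlt)
    · subst heq
      rw [List.drop_left] at hj
      exact Or.inl (List.cons_prefix_cons.mp hj).2
    · right
      rw [pv_infix_iff_exists_drop]
      refine ⟨j - p.length - 1, ?_⟩
      have h1 : (p ++ '\n' :: t).drop j = t.drop (j - p.length - 1) := by
        have : j = p.length + (1 + (j - p.length - 1)) := by omega
        rw [this, ← List.drop_drop, List.drop_left, ← List.drop_drop]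
        simp
      rwa [h1] at hj
  · intro h
    rw [pv_infix_iff_exists_drop]
    rcases h with h | h
    · exact ⟨p.length, by rw [List.drop_left]; exact List.cons_prefix_cons.mpr ⟨rfl, h⟩⟩
    · obtain ⟨j, hj⟩ := (pv_infix_iff_exists_drop _ _).mp h
      refine ⟨p.length + 1 + j, ?_⟩
      have h1 : (p ++ '\n' :: t).drop (p.length + 1 + j) = t.drop j := by
        have : p.length + 1 + j = p.length + (1 + j) := by omega
        rw [this, ← List.drop_drop, List.drop_left, ← List.drop_drop]
        simp
      rwa [h1]

-- H4: find pinned to the first occurrence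
theorem pv_find_eq (s sub : List Char) (k : Nat) (hk : k ≤ s.length)
    (hpre : sub <+: s.drop k) (hmin : ∀ i, i < k → ¬ sub <+: s.drop i) :
    PySem.Chars.find s sub = (k : Int) := by
  have hinf : sub <:+: s := (pv_infix_iff_exists_drop _ _).mpr ⟨k, hpre⟩
  have hnn : 0 ≤ PySem.Chars.find s sub := (PySem.Chars.find_nonneg_iff s sub).mpr hinf
  obtain ⟨hat, hm⟩ := PySem.Chars.find_spec hnn
  have : (PySem.Chars.find s sub).toNat = k := by
    rcases lt_trichotomy (PySem.Chars.find s sub).toNat k with hlt | heq | hgt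
    · exact absurd hat (hmin _ hlt)
    · exact heq
    · exact absurd hpre (hm k hgt)
  omega

theorem pv_first_nl (cs : List Char) (h : '\n' ∈ cs) :
    ∃ p t, cs = p ++ '\n' :: t ∧ '\n' ∉ p := by
  induction cs with
  | nil => cases h
  | cons c rest ih =>
    by_cases hc : c = '\n'
    · exact ⟨[], rest, by simp [hc], by simp⟩
    · have hr : '\n' ∈ rest := by
        rcases List.mem_cons.mp h with h1 | h1
        · exact absurd h1.symm hc
        · exact h1
      obtain ⟨p, t, heq, hnp⟩ := ih hr
      exact ⟨c :: p, t, by simp [heq], by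
        intro hm
        rcases List.mem_cons.mp hm with h1 | h1
        · exact hc h1.symm
        · exact hnp h1⟩

def pvIdxA (cs : List Char) : Nat :=
  (((pvSplitNL cs).findIdx? (fun l => pvM.isPrefixOf l)).getD 0)

def pvA (cs : List Char) : List Char :=
  PySem.Chars.join ['\n'] ((pvSplitNL cs).drop (pvIdxA cs))

def pvB (cs : List Char) : List Char :=
  if pvM.isPrefixOf cs then cs
  else if PySem.Chars.find cs ('\n' :: pvM) = -1 then cs
  else cs.drop ((PySem.Chars.find cs ('\n' :: pvM)).toNat + 1)

theorem pv_none_iff (cs : List Char) :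
    (pvSplitNL cs).findIdx? (fun l => pvM.isPrefixOf l) = none ↔
      (¬ pvM <+: cs ∧ ¬ ('\n' :: pvM) <:+: cs) := by
  induction hn : cs.length using Nat.strong_induction_on generalizing cs with
  | _ n ih =>
    by_cases hmem : '\n' ∈ cs
    · obtain ⟨p, t, heq, hnp⟩ := pv_first_nl cs hmem
      subst heq
      rw [pvSplitNL_append p t hnp, List.findIdx?_cons]
      have iht := ih t.length (by simp at hn; omega) t rfl
      by_cases hpp : pvM.isPrefixOf p
      · simp only [hpp, if_pos]
        constructor
        · intro hh; cases hh
        · intro ⟨h1, _⟩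
          exact absurd ((List.isPrefixOf_iff_prefix.mp hpp).trans (List.prefix_append _ _)) h1
      · simp only [hpp, Bool.false_eq_true, if_neg, not_false_iff, Option.map_eq_none_iff]
        rw [iht, pv_infix_decomp p t hnp]
        constructor
        · intro ⟨h1, h2⟩
          refine ⟨fun hc => hpp (List.isPrefixOf_iff_prefix.mpr (pv_prefix_no_nl pvM pvM_no_nl p t hc)), ?_⟩
          intro hc
          rcases hc with hc | hc
          · exact h1 hc
          · exact h2 hc
        · intro ⟨h1, h2⟩
          exact ⟨fun hc => h2 (Or.inl hc), fun hc => h2 (Or.inr hc)⟩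
    · rw [pvSplitNL_no_nl cs hmem, List.findIdx?_cons]
      by_cases hpp : pvM.isPrefixOf cs
      · simp only [hpp, if_pos]
        constructor
        · intro hh; cases hh
        · intro ⟨h1, _⟩; exact absurd (List.isPrefixOf_iff_prefix.mp hpp) h1
      · simp only [hpp, Bool.false_eq_true, if_neg, not_false_iff, List.findIdx?_nil, Option.map_none]
        constructor
        · intro _
          refine ⟨fun hc => hpp (List.isPrefixOf_iff_prefix.mpr hc), fun hc => ?_⟩
          exact hmem (hc.subset List.mem_cons_self)
        · intro _; trivial

theorem pv_drop_shift (p t : List Char) (m : Nat) :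
    (p ++ '\n' :: t).drop (p.length + 1 + m) = t.drop m := by
  have h : p.length + 1 + m = p.length + (1 + m) := by omega
  rw [h, ← List.drop_drop, List.drop_left, ← List.drop_drop]
  simp

theorem pv_main : ∀ (cs : List Char), pvA cs = pvB cs := by
  intro cs
  induction hn : cs.length using Nat.strong_induction_on generalizing cs with
  | _ n ih =>
    by_cases hmem : '\n' ∈ cs
    · obtain ⟨p, t, heq, hnp⟩ := pv_first_nl cs hmem
      subst heq
      have hsp := pvSplitNL_append p t hnp
      by_cases hpp : pvM.isPrefixOf p
      · have hidx : pvIdxA (p ++ '\n' :: t) = 0 := by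
          unfold pvIdxA; rw [hsp, List.findIdx?_cons, if_pos hpp]; rfl
        have hBpre : pvM.isPrefixOf (p ++ '\n' :: t) = true :=
          List.isPrefixOf_iff_prefix.mpr
            ((List.isPrefixOf_iff_prefix.mp hpp).trans (List.prefix_append p _))
        unfold pvA pvB
        rw [hidx, List.drop_zero, pv_join_splitNL, if_pos hBpre]
      · have hAnot : ¬ pvM <+: (p ++ '\n' :: t) :=
          fun hc => hpp (List.isPrefixOf_iff_prefix.mpr (pv_prefix_no_nl pvM pvM_no_nl p t hc))
        have hBpre : ¬ pvM.isPrefixOf (p ++ '\n' :: t) = true :=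
          fun hc => hAnot (List.isPrefixOf_iff_prefix.mp hc)
        cases hF : (pvSplitNL t).findIdx? (fun l => pvM.isPrefixOf l) with
        | none =>
          have hidx : pvIdxA (p ++ '\n' :: t) = 0 := by
            unfold pvIdxA; rw [hsp, List.findIdx?_cons, if_neg (by simp [hpp]), hF]; rfl
          obtain ⟨h1, h2⟩ := (pv_none_iff t).mp hF
          have hninf : ¬ ('\n' :: pvM) <:+: (p ++ '\n' :: t) := by
            rw [pv_infix_decomp p t hnp]
            rintro (hc | hc)
            · exact h1 hc
            · exact h2 hc
          have hfind : PySem.Chars.find (p ++ '\n' :: t) ('\n' :: pvM) = -1 :=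
            (PySem.Chars.find_eq_neg_one_iff _ _).mpr hninf
          unfold pvA pvB
          rw [hidx, List.drop_zero, pv_join_splitNL, if_neg hBpre, if_pos hfind]
        | some j =>
          have hidx : pvIdxA (p ++ '\n' :: t) = j + 1 := by
            unfold pvIdxA; rw [hsp, List.findIdx?_cons, if_neg (by simp [hpp]), hF]; rfl
          have hidxt : pvIdxA t = j := by
            unfold pvIdxA; rw [hF]; rfl
          have hAeq : pvA (p ++ '\n' :: t) = pvA t := by
            unfold pvA
            rw [hidx, hidxt, hsp, List.drop_succ_cons]
          have hiht : pvA t = pvB t := ih t.length (by simp at hn; omega) t rfl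
          by_cases hpt : pvM.isPrefixOf t
          · have hfind : PySem.Chars.find (p ++ '\n' :: t) ('\n' :: pvM) = (p.length : Int) := by
              apply pv_find_eq _ _ p.length (by simp only [List.length_append, List.length_cons]; omega)
              · rw [List.drop_left]
                exact List.cons_prefix_cons.mpr ⟨rfl, List.isPrefixOf_iff_prefix.mp hpt⟩
              · exact fun i hi => pv_not_prefix_drop_lt p t hnp i hi
            have hfne : PySem.Chars.find (p ++ '\n' :: t) ('\n' :: pvM) ≠ -1 := by
              rw [hfind]; omega
            have hdrop : (p ++ '\n' :: t).drop (p.length + 1) = t := by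
              have := pv_drop_shift p t 0
              simpa using this
            rw [hAeq, hiht]
            unfold pvB
            rw [if_pos hpt, if_neg hBpre, if_neg hfne, hfind]
            simp [hdrop]
          · have h1 : ¬ pvM <+: t := fun hc => hpt (List.isPrefixOf_iff_prefix.mpr hc)
            have hinf : ('\n' :: pvM) <:+: t := by
              by_contra hc
              have := (pv_none_iff t).mpr ⟨h1, hc⟩
              rw [hF] at this; cases this
            have hnn : 0 ≤ PySem.Chars.find t ('\n' :: pvM) :=
              (PySem.Chars.find_nonneg_iff _ _).mpr hinf
            obtain ⟨hat, hm⟩ := PySem.Chars.find_spec hnn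
            set k : Nat := (PySem.Chars.find t ('\n' :: pvM)).toNat with hk
            have hkle : k ≤ t.length := by
              have := PySem.Chars.find_le_length t ('\n' :: pvM)
              omega
            have hfind : PySem.Chars.find (p ++ '\n' :: t) ('\n' :: pvM) = ((p.length + 1 + k : Nat) : Int) := by
              apply pv_find_eq _ _ (p.length + 1 + k) (by simp only [List.length_append, List.length_cons]; omega)
              · rw [pv_drop_shift]; exact hat
              · intro i hi
                rcases lt_trichotomy i p.length with hlt | hieq | hgt
                · exact pv_not_prefix_drop_lt p t hnp i hlt
                · subst hieq
                  rw [List.drop_left]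
                  intro hc
                  exact h1 (List.cons_prefix_cons.mp hc).2
                · have hrw : (p ++ '\n' :: t).drop i = t.drop (i - p.length - 1) := by
                    have hds := pv_drop_shift p t (i - p.length - 1)
                    rw [show p.length + 1 + (i - p.length - 1) = i from by omega] at hds
                    exact hds
                  rw [hrw]
                  exact hm (i - p.length - 1) (by omega)
            have hfne : PySem.Chars.find (p ++ '\n' :: t) ('\n' :: pvM) ≠ -1 := by
              rw [hfind]; omega
            have hfnet : PySem.Chars.find t ('\n' :: pvM) ≠ -1 := by omega
            rw [hAeq, hiht]
            unfold pvB
            rw [if_neg hpt, if_neg hBpre, if_neg hfne, if_neg hfnet, hfind]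
            have htoNat : ((p.length + 1 + k : Nat) : Int).toNat = p.length + 1 + k := by omega
            rw [htoNat]
            have : p.length + 1 + k + 1 = p.length + 1 + (k + 1) := by omega
            rw [this, pv_drop_shift]
    · have hidx : pvIdxA cs = 0 := by
        unfold pvIdxA
        rw [pvSplitNL_no_nl cs hmem, List.findIdx?_cons]
        split <;> rfl
      have hA : pvA cs = cs := by
        unfold pvA
        rw [hidx, List.drop_zero, pv_join_splitNL]
      rw [hA]
      unfold pvB
      by_cases hpp : pvM.isPrefixOf cs
      · rw [if_pos hpp]
      · have hfind : PySem.Chars.find cs ('\n' :: pvM) = -1 :=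
          (PySem.Chars.find_eq_neg_one_iff _ _).mpr
            (fun hc => hmem (hc.subset List.mem_cons_self))
        rw [if_neg hpp, if_pos hfind]

-- loop characterization
theorem pvFindStartA_eq (lines : List String) : ∀ (k : Int),
    pvFindStartA (PySem.List.enumerate lines k) =
      match lines.findIdx? (fun l => PySem.Str.startswith l "You are an IFRS expert") with
      | some j => k + (j : Int)
      | none => 0 := by
  induction lines with
  | nil => intro k; simp [PySem.List.enumerate, pvFindStartA]
  | cons l rest ihr =>
    intro k
    rw [PySem.List.enumerate_cons, List.findIdx?_cons]
    by_cases hl : PySem.Str.startswith l "You are an IFRS expert"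
    · simp only [pvFindStartA, if_pos hl]
      simp
    · simp only [pvFindStartA, hl, Bool.false_eq_true, if_neg, not_false_iff, ihr (k + 1)]
      cases hF : rest.findIdx? (fun l => PySem.Str.startswith l "You are an IFRS expert") with
      | none => simp
      | some j => simp; push_cast; ring

-- the lines of A, at string level, map to pvSplitNL
theorem pv_lines_eq (s : String) :
    ((PySem.Str.split? s "\n").getD []).map String.toList = pvSplitNL s.toList := by
  have h := PySem.Str.split?_map s "\n"
  have hsep : ("\n" : String).toList = ['\n'] := by decide
  rw [hsep] at h
  unfold PySem.Chars.split? at h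
  simp only [List.isEmpty_cons, if_neg] at h
  cases hsp : PySem.Str.split? s "\n" with
  | none => rw [hsp] at h; simp at h
  | some lines =>
    rw [hsp] at h
    simp only [Option.map_some, Option.some_inj] at h
    simpa [pvSplitOn_eq] using h

theorem pv_bridge_A (s : String) :
    (extract_prompt_content_py s).toList = pvA s.toList := by
  have hgoal : extract_prompt_content_py s =
      PySem.Str.join "\n" (PySem.List.slice ((PySem.Str.split? s "\n").getD [])
        (some (pvFindStartA (PySem.List.enumerate ((PySem.Str.split? s "\n").getD []) 0))) none) := rfl
  rw [hgoal]
  unfold pvA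
  set lines := (PySem.Str.split? s "\n").getD [] with hlines
  have hmapped : lines.map String.toList = pvSplitNL s.toList := pv_lines_eq s
  have hfi : lines.findIdx? (fun l => PySem.Str.startswith l "You are an IFRS expert") =
      (pvSplitNL s.toList).findIdx? (fun l => pvM.isPrefixOf l) := by
    rw [← hmapped, List.findIdx?_map]
    congr 1
  rw [pvFindStartA_eq lines 0]
  cases hF : (pvSplitNL s.toList).findIdx? (fun l => pvM.isPrefixOf l) with
  | none =>
    rw [hfi, hF]
    have hidx : pvIdxA s.toList = 0 := by unfold pvIdxA; rw [hF]; rfl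
    rw [hidx]
    rw [PySem.List.slice_from lines (le_refl 0)]
    simp only [Int.toNat_zero, List.drop_zero]
    rw [PySem.Str.toList_join, hmapped]
    rfl
  | some j =>
    rw [hfi, hF]
    have hidx : pvIdxA s.toList = j := by unfold pvIdxA; rw [hF]; rfl
    rw [hidx]
    simp only [zero_add]
    rw [PySem.List.slice_from lines (by positivity)]
    rw [PySem.Str.toList_join, List.map_drop, hmapped]
    simp

theorem pv_cat_toList : ("\n" ++ "You are an IFRS expert").toList = '\n' :: pvM := by
  decide

theorem pv_bridge_B (s : String) :
    (extract_prompt_content_py_alt s).toList = pvB s.toList := by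
  unfold extract_prompt_content_py_alt pvB
  by_cases h1 : PySem.Str.startswith s "You are an IFRS expert"
  · have h1' : pvM.isPrefixOf s.toList = true := by
      have := h1
      rw [PySem.Str.startswith_eq] at this
      exact this
    rw [if_pos h1, if_pos h1']
  · have h1' : ¬ pvM.isPrefixOf s.toList = true := by
      intro hc
      apply h1
      rw [PySem.Str.startswith_eq]
      exact hc
    rw [if_neg h1, if_neg h1']
    have hfind : PySem.Str.find s ("\n" ++ "You are an IFRS expert") =
        PySem.Chars.find s.toList ('\n' :: pvM) := by
      rw [PySem.Str.find_eq, pv_cat_toList]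
    by_cases h2 : PySem.Chars.find s.toList ('\n' :: pvM) = -1
    · rw [hfind, if_pos h2, if_pos h2]
    · simp only [hfind, if_neg h2]
      rw [PySem.Str.toList_slice, PySem.Chars.slice_eq_listSlice]
      have hnn : 0 ≤ PySem.Chars.find s.toList ('\n' :: pvM) := by
        have := PySem.Chars.neg_one_le_find s.toList ('\n' :: pvM)
        omega
      rw [PySem.List.slice_from _ (by omega : (0:Int) ≤ PySem.Chars.find s.toList ('\n' :: pvM) + 1)]
      congr 1
      omega

theorem pv_final (s : String) : extract_prompt_content_py s = extract_prompt_content_py_alt s := by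
  apply String.toList_inj.mp
  rw [pv_bridge_A, pv_main, ← pv_bridge_B]

-- ===== VERDICT (by name: the statement is the Claim_ definition above) =====
theorem extract_prompt_content_py_spec : Claim_equal_extract_prompt_content_py := by
  intro full_output _
  unfold Spec_extract_prompt_content_py
  exact pv_final full_output
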